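-- pv_equiv track=rewrite | github.com/artandmath/AssetManager | AssetManager/model.py | bisect_case_insensitive
-- ===== SOURCE A (Python) =====
-- def bisect_case_insensitive(sorted_list, new_item):
--     """Locate the insertion point for new_item to maintain sorted order.
--
--     Taken from https://stackoverflow.com/a/41903429
--
--     Args:
--         sorted_list (list): Sorted list.
--         new_item (str): Item to find sorted location for.
--
--     Returns:
--         int: Index at which point new_item must be inserted.
--
--     """
--     key = new_item.lower()
--     low, high = 0, len(sorted_list)
--     while low < high:
--         mid = (low + high) // 2
--         if key < sorted_list[mid].lower():
--             high = mid
--         else: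
--             low = mid + 1
--     return low
-- ===== SOURCE B (Python) =====
-- def bisect_case_insensitive(sorted_list, new_item):
--     """Recursive binary search over a precomputed lowercased key list."""
--     keys = [s.lower() for s in sorted_list]
--     key = new_item.lower()
--
--     def go(lo, hi):
--         if lo >= hi:
--             return lo
--         mid = (lo + hi) // 2
--         return go(lo, mid) if key < keys[mid] else go(mid + 1, hi)
--
--     return go(0, len(keys))
-- ===== Notes on version B (the rewrite author's own statement) =====
-- stated objective: alternative
-- what changed: Replaces the iterative while-loop that re-lowercases elements inside the loop with a recursive divide-and-conquer helper over a lowercased key list precomputed once.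
import Mathlib
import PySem

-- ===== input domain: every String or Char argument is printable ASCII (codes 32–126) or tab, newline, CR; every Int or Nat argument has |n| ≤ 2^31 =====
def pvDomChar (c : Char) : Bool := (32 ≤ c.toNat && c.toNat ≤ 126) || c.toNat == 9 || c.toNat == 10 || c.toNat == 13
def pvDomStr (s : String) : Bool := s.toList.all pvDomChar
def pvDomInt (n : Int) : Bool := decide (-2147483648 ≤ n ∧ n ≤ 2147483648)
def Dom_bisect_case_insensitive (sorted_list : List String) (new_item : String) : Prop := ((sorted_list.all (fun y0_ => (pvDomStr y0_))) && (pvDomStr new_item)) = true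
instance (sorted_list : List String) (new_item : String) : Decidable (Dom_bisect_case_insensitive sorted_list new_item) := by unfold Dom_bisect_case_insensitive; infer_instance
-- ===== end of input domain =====

-- B changes the decomposition: a recursive binary search over a lowercased key list built once,
-- instead of A's iterative while-loop that lowercases the probed element on each iteration.

-- ===== PORT A =====
-- A's while loop as structural recursion on the Int state (low, high); the loop body is unchanged.
-- sorted_list[mid] is ported with pyGetD: on every reachable state 0 ≤ low ≤ mid < high ≤ len,
-- so the index is always in range and Python never raises here.
def bisectALoop (sorted_list : List String) (key : String) (low high : Int) : Int :=
  if _h : low < high then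
    let mid := PySem.Int.floordiv (low + high) 2
    if key < PySem.Str.lower (PySem.List.pyGetD sorted_list mid "") then
      bisectALoop sorted_list key low mid
    else
      bisectALoop sorted_list key (mid + 1) high
  else low
  termination_by (high - low).toNat
  decreasing_by
  · rw [PySem.Int.floordiv_eq_ediv_of_pos (by norm_num)]; omega
  · rw [PySem.Int.floordiv_eq_ediv_of_pos (by norm_num)]; omega

def bisect_case_insensitive (sorted_list : List String) (new_item : String) : Int :=
  let key := PySem.Str.lower new_item
  bisectALoop sorted_list key 0 sorted_list.length

-- ===== PORT B =====
-- Source B's recursive helper go(lo, hi); lo/hi are internal nonnegative counters, kept as Nat.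
-- keys[mid] is ported with getD: every reachable call has lo ≤ mid < hi ≤ len, so the index
-- is always in range and Python never raises here.
def bisectBGo (keys : List String) (key : String) (lo hi : Nat) : Nat :=
  if _h : lo ≥ hi then lo
  else
    let mid := (lo + hi) / 2
    if key < keys.getD mid "" then bisectBGo keys key lo mid
    else bisectBGo keys key (mid + 1) hi
  termination_by hi - lo
  decreasing_by
  · omega
  · omega

def bisect_case_insensitive_alt (sorted_list : List String) (new_item : String) : Int :=
  let keys := sorted_list.map PySem.Str.lower
  let key := PySem.Str.lower new_item
  (bisectBGo keys key 0 keys.length : Int)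

-- ===== PRECONDITION & SPEC =====
def Spec_bisect_case_insensitive (sorted_list : List String) (new_item : String) (out : Int) : Prop := out = bisect_case_insensitive_alt sorted_list new_item
instance (sorted_list : List String) (new_item : String) (out : Int) : Decidable (Spec_bisect_case_insensitive sorted_list new_item out) := by unfold Spec_bisect_case_insensitive; infer_instance

-- ===== CLAIM (what is proved, stated in full; the proofs are below) =====
def Claim_equal_bisect_case_insensitive : Prop := ∀ (sorted_list : List String) (new_item : String), Dom_bisect_case_insensitive sorted_list new_item → Spec_bisect_case_insensitive sorted_list new_item (bisect_case_insensitive sorted_list new_item)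

-- ===== LEMMAS AND PROOFS =====

-- A's loop and B's recursion agree on every in-range state (lo, hi).
theorem bisect_loop_eq_go (xs : List String) (key : String) :
    ∀ (fuel lo hi : Nat), hi - lo ≤ fuel → hi ≤ xs.length →
      bisectALoop xs key (lo : Int) (hi : Int) =
        (bisectBGo (xs.map PySem.Str.lower) key lo hi : Int) := by
  intro fuel
  induction fuel with
  | zero =>
    intro lo hi h1 _
    rw [bisectALoop, bisectBGo]
    rw [dif_neg (by omega), dif_pos (by omega)]
  | succ n ih =>
    intro lo hi h1 h2
    rw [bisectALoop, bisectBGo]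
    by_cases hlt : lo < hi
    · rw [dif_pos (by exact_mod_cast hlt), dif_neg (by omega)]
      have hmid : PySem.Int.floordiv ((lo : Int) + (hi : Int)) 2 = (((lo + hi) / 2 : Nat) : Int) := by
        rw [PySem.Int.floordiv_eq_ediv_of_pos (by norm_num)]
        omega
      have hmlt : (lo + hi) / 2 < xs.length := by omega
      have hget : PySem.List.pyGetD xs (((lo + hi) / 2 : Nat) : Int) "" =
          xs[(lo + hi) / 2] := by
        rw [PySem.List.pyGetD_natCast, List.getD_eq_getElem?_getD,
            List.getElem?_eq_getElem hmlt]; rfl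
      have hgetB : (xs.map PySem.Str.lower).getD ((lo + hi) / 2) "" =
          PySem.Str.lower (xs[(lo + hi) / 2]) := by
        rw [List.getD_eq_getElem?_getD, List.getElem?_map,
            List.getElem?_eq_getElem hmlt]; rfl
      simp only [hmid, hget, hgetB]
      by_cases hc : key < PySem.Str.lower (xs[(lo + hi) / 2])
      · rw [if_pos hc, if_pos hc]
        exact ih lo ((lo + hi) / 2) (by omega) (by omega)
      · rw [if_neg hc, if_neg hc]
        have : (((lo + hi) / 2 : Nat) : Int) + 1 = (((lo + hi) / 2 + 1 : Nat) : Int) := by omega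
        rw [this]
        exact ih ((lo + hi) / 2 + 1) hi (by omega) h2
    · rw [dif_neg (by exact_mod_cast hlt), dif_pos (by omega)]

-- ===== VERDICT (by name: the statement is the Claim_ definition above) =====
theorem bisect_case_insensitive_spec : Claim_equal_bisect_case_insensitive := by
  intro sorted_list new_item _
  unfold Spec_bisect_case_insensitive bisect_case_insensitive bisect_case_insensitive_alt
  simp only [List.length_map]
  exact_mod_cast bisect_loop_eq_go sorted_list (PySem.Str.lower new_item)
    sorted_list.length 0 sorted_list.length (by omega) (le_refl _)
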